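-- pv_equiv track=rewrite | github.com/gizemhayan/Skillab | src/processing/skill_extractor.py | _find_description_column
-- ===== SOURCE A (Python) =====
-- from typing import Dict, List, Pattern
--
-- def _find_description_column(columns: List[str]) -> str:
--     """Resolve the best-fit description column from an Excel dataset."""
--     canonical = {str(col).strip().lower(): col for col in columns}
--     candidates = [
--         "description",
--         "full_description",
--         "full description",
--         "job_description",
--         "job description",
--     ]
--     for key in candidates:
--         if key in canonical:
--             return canonical[key]
--     raise ValueError(
--         "Input Excel must contain one of: description, full_description, full description, "
--         "job_description, job description."
--     )
-- ===== SOURCE B (Python) =====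
-- def _find_description_column(columns):
--     """Resolve the best-fit description column from an Excel dataset."""
--     candidates = [
--         "description",
--         "full_description",
--         "full description",
--         "job_description",
--         "job description",
--     ]
--     best_rank = len(candidates)
--     best_col = None
--     for col in columns:
--         norm = str(col).strip().lower()
--         if norm in candidates:
--             rank = candidates.index(norm)
--             if rank <= best_rank:
--                 best_rank = rank
--                 best_col = col
--     if best_col is None:
--         raise ValueError(
--             "Input Excel must contain one of: description, full_description, full description, "
--             "job_description, job description."
--         )
--     return best_col
-- ===== Notes on version B (the rewrite author's own statement) =====
-- stated objective: alternative
-- what changed: Replaces A's two-stage scheme (build a normalized->original dict, then probe candidate keys in priority order) by a single pass over columns that tracks the best-ranked match so far (rank = candidate priority, ties kept last to reproduce the dict's last-wins overwrite).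
import Mathlib
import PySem

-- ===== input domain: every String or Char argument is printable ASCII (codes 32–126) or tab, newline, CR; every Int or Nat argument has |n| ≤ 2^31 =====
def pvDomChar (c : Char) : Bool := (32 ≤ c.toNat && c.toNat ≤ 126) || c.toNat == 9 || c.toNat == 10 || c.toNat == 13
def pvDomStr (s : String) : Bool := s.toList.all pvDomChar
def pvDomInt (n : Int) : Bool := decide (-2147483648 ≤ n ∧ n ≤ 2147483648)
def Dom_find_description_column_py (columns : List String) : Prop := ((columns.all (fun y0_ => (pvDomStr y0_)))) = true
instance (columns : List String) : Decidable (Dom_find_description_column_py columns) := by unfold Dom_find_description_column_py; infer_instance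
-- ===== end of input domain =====

-- B replaces A's two stages (build a normalized->original dict, then try candidates in order)
-- by ONE pass over columns tracking the best-ranked match so far (rank = candidate priority,
-- ties kept last to match the dict's last-wins overwrite). Same return value; A raises
-- ValueError when nothing matches (excluded by Pre_).

-- str(col).strip().lower()
def pvNorm (s : String) : String := PySem.Str.lower (PySem.Str.strip s)

def pvCandidates : List String :=
  ["description", "full_description", "full description", "job_description", "job description"]

-- ===== PORT A =====
def find_description_column_py (columns : List String) : String :=
  let canonical : PySem.Dict String String :=
    columns.foldl (fun d col => d.insert (pvNorm col) col) PySem.Dict.empty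
  match pvCandidates.findSome? (fun key => canonical.get? key) with
  | some v => v
  | none => ""   -- Python raises ValueError here; excluded by Pre_

-- ===== PORT B =====
-- one loop iteration of Source B: keep the best (lowest) rank seen, last-wins on equal rank
def pvStep (st : Nat × Option String) (col : String) : Nat × Option String :=
  let norm := pvNorm col
  if pvCandidates.contains norm then
    let rank := (PySem.List.index? pvCandidates norm).getD 0  -- .index cannot fail under the `in` check
    if rank ≤ st.1 then (rank, some col) else st
  else st

def find_description_column_py_alt (columns : List String) : String :=
  let st := columns.foldl pvStep (pvCandidates.length, (none : Option String))
  match st.2 with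
  | some v => v
  | none => ""   -- ValueError in Source B; excluded by Pre_

-- ===== PRECONDITION & SPEC =====
-- Pre_ excludes exactly the inputs where A (and B) raise ValueError: no column normalizes to a candidate.
def Pre_find_description_column_py (columns : List String) : Prop :=
  (columns.any (fun col => pvCandidates.contains (pvNorm col))) = true
instance (columns : List String) : Decidable (Pre_find_description_column_py columns) := by
  unfold Pre_find_description_column_py; infer_instance

def pvWitness_find_description_column_py : List String := ["  Description "]

def Spec_find_description_column_py (columns : List String) (out : String) : Prop := out = find_description_column_py_alt columns
instance (columns : List String) (out : String) : Decidable (Spec_find_description_column_py columns out) := by unfold Spec_find_description_column_py; infer_instance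

-- ===== CLAIM (what is proved, stated in full; the proofs are below) =====
def Claim_equal_find_description_column_py : Prop := ∀ (columns : List String), Dom_find_description_column_py columns → Pre_find_description_column_py columns → Spec_find_description_column_py columns (find_description_column_py columns)

-- ===== LEMMAS AND PROOFS =====

-- last column whose normalized form equals k (the value A's last-wins dict stores at k)
def pvLastM (k : String) (cs : List String) : Option String :=
  cs.foldl (fun f c => if pvNorm c = k then some c else f) none

-- the state B's single pass reaches, expressed through A's per-candidate view
def pvView (cs : List String) : Nat × Option String :=
  match pvLastM "description" cs with
  | some v => (0, some v)
  | none => match pvLastM "full_description" cs with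
    | some v => (1, some v)
    | none => match pvLastM "full description" cs with
      | some v => (2, some v)
      | none => match pvLastM "job_description" cs with
        | some v => (3, some v)
        | none => match pvLastM "job description" cs with
          | some v => (4, some v)
          | none => (5, none)

theorem pvLastM_append (k : String) (cs : List String) (c : String) :
    pvLastM k (cs ++ [c]) = if pvNorm c = k then some c else pvLastM k cs := by
  simp [pvLastM, List.foldl_append]

theorem pvStep_view (cs : List String) (c : String) :
    pvStep (pvView cs) c = pvView (cs ++ [c]) := by
  have i0 : (List.idxOf? "description" ["description", "full_description", "full description", "job_description", "job description"]).getD 0 = 0 := by decide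
  have i1 : (List.idxOf? "full_description" ["description", "full_description", "full description", "job_description", "job description"]).getD 0 = 1 := by decide
  have i2 : (List.idxOf? "full description" ["description", "full_description", "full description", "job_description", "job description"]).getD 0 = 2 := by decide
  have i3 : (List.idxOf? "job_description" ["description", "full_description", "full description", "job_description", "job description"]).getD 0 = 3 := by decide
  have i4 : (List.idxOf? "job description" ["description", "full_description", "full description", "job_description", "job description"]).getD 0 = 4 := by decide
  by_cases h0 : pvNorm c = "description" <;>
  by_cases h1 : pvNorm c = "full_description" <;>
  by_cases h2 : pvNorm c = "full description" <;>
  by_cases h3 : pvNorm c = "job_description" <;>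
  by_cases h4 : pvNorm c = "job description" <;>
  rcases hA : pvLastM "description" cs with _ | vA <;>
    rcases hB : pvLastM "full_description" cs with _ | vB <;>
    rcases hC : pvLastM "full description" cs with _ | vC <;>
    rcases hD : pvLastM "job_description" cs with _ | vD <;>
    rcases hE : pvLastM "job description" cs with _ | vE <;>
    simp_all [pvView, pvStep, pvCandidates, pvLastM_append]

theorem pvFoldl_view (cs : List String) :
    cs.foldl pvStep (pvCandidates.length, (none : Option String)) = pvView cs := by
  induction cs using List.reverseRecOn with
  | nil => rfl
  | append_singleton cs c ih => rw [List.foldl_append, List.foldl_cons, List.foldl_nil, ih, pvStep_view]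

-- the last-wins dict built by the comprehension answers lookups exactly like the last-match scan
theorem pv_get?_foldl_insert (columns : List String) (d : PySem.Dict String String) (k : String) :
    (columns.foldl (fun d col => d.insert (pvNorm col) col) d).get? k =
      columns.foldl (fun found col => if pvNorm col = k then some col else found) (d.get? k) := by
  induction columns generalizing d with
  | nil => rfl
  | cons c cs ih =>
      simp only [List.foldl_cons, ih]
      by_cases h : pvNorm c = k
      · subst h; rw [PySem.Dict.get?_insert_self]; simp
      · rw [PySem.Dict.get?_insert_of_ne _ _ (fun hh => h hh.symm)]; simp [h]

-- ===== VERDICT (by name: the statement is the Claim_ definition above) =====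
theorem find_description_column_py_spec : Claim_equal_find_description_column_py := by
  intro columns _ _
  unfold Spec_find_description_column_py find_description_column_py find_description_column_py_alt
  have hA : ∀ k, (columns.foldl (fun d col => d.insert (pvNorm col) col) PySem.Dict.empty).get? k
      = pvLastM k columns := by
    intro k
    rw [pv_get?_foldl_insert, PySem.Dict.get?_empty]
    rfl
  rw [pvFoldl_view]
  simp only [pvCandidates, List.findSome?, hA]
  rcases hA' : pvLastM "description" columns with _ | vA <;>
  rcases hB : pvLastM "full_description" columns with _ | vB <;>
  rcases hC : pvLastM "full description" columns with _ | vC <;>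
  rcases hD : pvLastM "job_description" columns with _ | vD <;>
  rcases hE : pvLastM "job description" columns with _ | vE <;>
  simp_all [pvView]
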